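-- pv_equiv track=rewrite | github.com/wbniv/WorldFoundry | scripts/minify_lua.py | _long_bracket_level
-- ===== SOURCE A (Python) =====
-- def _long_bracket_level(src: str, pos: int) -> int:
--     """If src[pos:] starts with `[`, optional `=`s, `[`, return the level
--     (count of `=`). Otherwise -1."""
--     if pos >= len(src) or src[pos] != '[':
--         return -1
--     j = pos + 1
--     level = 0
--     while j < len(src) and src[j] == '=':
--         level += 1
--         j += 1
--     if j < len(src) and src[j] == '[':
--         return level
--     return -1
-- ===== SOURCE B (Python) =====
-- def _long_bracket_level(src: str, pos: int) -> int:
--     """If src[pos:] starts with `[`, optional `=`s, `[`, return the level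
--     (count of `=`). Otherwise -1."""
--     rest = src[pos:]
--     if rest.startswith('['):
--         inner = rest[1:]
--         stripped = inner.lstrip('=')
--         if stripped.startswith('['):
--             return len(inner) - len(stripped)
--     return -1
-- ===== Notes on version B (the rewrite author's own statement) =====
-- stated objective: idiomatic
-- what changed: B replaces the index-based while loop with string slicing: it takes the suffix src[pos:], checks it starts with '[', strips the run of '=' with lstrip and checks for the closing '[', computing the level as a length difference instead of a counter.
-- intended difference: On negative pos where src[pos] is '[' followed only by '='s up to the end of the string and the first non-'=' character from index 0 is '[', A's scan wraps past the end of the string back to index 0 and returns a level stitched from the end and start of the string (e.g. A('[', -1) == 0), while B returns -1; B's is intended since no long bracket starts at src[pos:]. — e.g. on _long_bracket_level("[", -1): A returns 0, B returns -1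
import Mathlib
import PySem

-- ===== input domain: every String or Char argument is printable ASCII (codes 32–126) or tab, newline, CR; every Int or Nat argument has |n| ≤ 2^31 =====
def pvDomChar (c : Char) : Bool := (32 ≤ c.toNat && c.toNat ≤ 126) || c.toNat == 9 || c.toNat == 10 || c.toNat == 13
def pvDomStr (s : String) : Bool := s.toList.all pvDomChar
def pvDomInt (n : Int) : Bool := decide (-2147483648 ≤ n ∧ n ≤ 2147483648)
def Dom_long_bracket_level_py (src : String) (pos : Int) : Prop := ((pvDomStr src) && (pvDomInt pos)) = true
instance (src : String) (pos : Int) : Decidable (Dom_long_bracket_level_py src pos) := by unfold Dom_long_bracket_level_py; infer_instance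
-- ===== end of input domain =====

-- B re-implements the scan with slicing: take the suffix src[pos:], check it starts with '[',
-- strip the run of '=' and check for a second '[' — no index loop (objective: idiomatic).
-- A's value on negative pos is an accident of Python's negative-index wraparound (its scan can
-- wrap from the end of the string back to index 0); B treats pos as the start of the suffix
-- src[pos:], which is the intended reading — see D_ below.


-- ===== PORT A =====
-- final 'if j < len(src) and src[j] == '[': return level / return -1'
def pvAFinal (s : List Char) (j : Int) (level : Int) : Int :=
  if j < (s.length : Int) ∧ PySem.List.pyGet? s j = some '[' then level else -1

-- the 'while j < len(src) and src[j] == '=':' loop; fuel bounds the iteration count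
def pvALoop (s : List Char) (j : Int) (level : Int) : Nat → Int
  | 0 => pvAFinal s j level
  | fuel + 1 =>
    if j < (s.length : Int) ∧ PySem.List.pyGet? s j = some '=' then
      pvALoop s (j + 1) (level + 1) fuel
    else pvAFinal s j level

def long_bracket_level_py (src : String) (pos : Int) : Int :=
  if (src.toList.length : Int) ≤ pos ∨ ¬ PySem.List.pyGet? src.toList pos = some '[' then -1
  else pvALoop src.toList (pos + 1) 0 ((src.toList.length : Int) - pos).toNat

-- ===== PORT B =====
def long_bracket_level_py_alt (src : String) (pos : Int) : Int :=
  let rest := PySem.List.slice src.toList (some pos) none      -- rest = src[pos:]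
  if PySem.Chars.startswith rest ['['] then
    let inner := PySem.List.slice rest (some 1) none           -- inner = rest[1:]
    let stripped := inner.dropWhile (· == '=')                 -- inner.lstrip('='): exact, lstrip with the one-char set '=' drops exactly the leading '='s
    if PySem.Chars.startswith stripped ['['] then
      (inner.length : Int) - (stripped.length : Int)
    else -1
  else -1

-- ===== PRECONDITION & SPEC =====
-- Pre_ excludes only pos < -len(src) (with pos < len(src)), where A raises IndexError on src[pos].
def Pre_long_bracket_level_py (src : String) (pos : Int) : Prop :=
  -(src.toList.length : Int) ≤ pos
instance (src : String) (pos : Int) : Decidable (Pre_long_bracket_level_py src pos) := by unfold Pre_long_bracket_level_py; infer_instance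
def pvWitness_long_bracket_level_py : String × Int := ("[==[x", 0)

-- On negative pos whose suffix src[pos+1:] is all '=' and whose first non-'=' character from
-- index 0 is '[', A's scan wraps past the end of the string back to index 0 and returns a level
-- stitched from the end and the start of the string, while B returns -1; B's is the intended
-- value since no long bracket starts at src[pos:].
def D_long_bracket_level_py (src : String) (pos : Int) : Prop :=
  pos < 0 ∧ -(src.toList.length : Int) ≤ pos ∧
  src.toList[(pos + src.toList.length).toNat]? = some '[' ∧
  (∀ i, i < src.toList.length → (pos + src.toList.length).toNat < i → src.toList[i]? = some '=') ∧
  (∃ j, j < src.toList.length ∧ (∀ i, i < j → src.toList[i]? = some '=') ∧ src.toList[j]? = some '[')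
instance (src : String) (pos : Int) : Decidable (D_long_bracket_level_py src pos) := by unfold D_long_bracket_level_py; infer_instance

def Spec_long_bracket_level_py (src : String) (pos : Int) (out : Int) : Prop := ¬ D_long_bracket_level_py src pos → out = long_bracket_level_py_alt src pos
instance (src : String) (pos : Int) (out : Int) : Decidable (Spec_long_bracket_level_py src pos out) := by unfold Spec_long_bracket_level_py; infer_instance

def pvDiffWitness_long_bracket_level_py : String × Int := ("[", -1)
def pvDiffWitnessOut_long_bracket_level_py : Int × Int := (0, -1)

-- ===== CLAIM (what is proved, stated in full; the proofs are below) =====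
def Claim_unchanged_long_bracket_level_py : Prop := ∀ (src : String) (pos : Int), Dom_long_bracket_level_py src pos → Pre_long_bracket_level_py src pos → Spec_long_bracket_level_py src pos (long_bracket_level_py src pos)
def Claim_changed_long_bracket_level_py : Prop := Dom_long_bracket_level_py (pvDiffWitness_long_bracket_level_py.1) (pvDiffWitness_long_bracket_level_py.2) ∧ Pre_long_bracket_level_py (pvDiffWitness_long_bracket_level_py.1) (pvDiffWitness_long_bracket_level_py.2) ∧ D_long_bracket_level_py (pvDiffWitness_long_bracket_level_py.1) (pvDiffWitness_long_bracket_level_py.2) ∧ long_bracket_level_py (pvDiffWitness_long_bracket_level_py.1) (pvDiffWitness_long_bracket_level_py.2) = pvDiffWitnessOut_long_bracket_level_py.1 ∧ long_bracket_level_py_alt (pvDiffWitness_long_bracket_level_py.1) (pvDiffWitness_long_bracket_level_py.2) = pvDiffWitnessOut_long_bracket_level_py.2 ∧ pvDiffWitnessOut_long_bracket_level_py.1 ≠ pvDiffWitnessOut_long_bracket_level_py.2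
def Claim_exact_long_bracket_level_py : Prop := ∀ (src : String) (pos : Int), Dom_long_bracket_level_py src pos → Pre_long_bracket_level_py src pos → D_long_bracket_level_py src pos → long_bracket_level_py src pos ≠ long_bracket_level_py_alt src pos

-- ===== LEMMAS AND PROOFS =====

-- reference scan: consume '='s counting them, then demand '['
def scanSpec (t : List Char) (level : Int) : Int :=
  match t with
  | [] => -1
  | c :: r => if c = '=' then scanSpec r (level + 1) else if c = '[' then level else -1

-- reference for A's scan started at a NEGATIVE index: t is the tail of the string from there;
-- when it is exhausted the scan wraps to index 0 and continues over all of s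
def scanNegSpec (t : List Char) (s : List Char) (level : Int) : Int :=
  match t with
  | [] => scanSpec s level
  | c :: r => if c = '=' then scanNegSpec r s (level + 1) else if c = '[' then level else -1

theorem pvALoop_nonneg (s : List Char) :
    ∀ (fuel j : Nat) (level : Int), s.length ≤ j + fuel →
      pvALoop s (j : Int) level fuel = scanSpec (s.drop j) level := by
  intro fuel
  induction fuel with
  | zero =>
    intro j level h
    have hj : s.length ≤ j := by omega
    simp only [pvALoop, pvAFinal, List.drop_eq_nil_of_le hj, scanSpec]
    rw [if_neg]
    rintro ⟨h1, -⟩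
    omega
  | succ f ih =>
    intro j level h
    have hstep : pvALoop s (j : Int) level (f + 1) =
        if (j : Int) < (s.length : Int) ∧ PySem.List.pyGet? s (j : Int) = some '=' then
          pvALoop s ((j : Int) + 1) (level + 1) f
        else pvAFinal s (j : Int) level := rfl
    by_cases hj : j < s.length
    · have hget : PySem.List.pyGet? s (j : Int) = some s[j] := by
        simp [PySem.List.pyGet?_natCast, List.getElem?_eq_getElem hj]
      have hdrop : s.drop j = s[j] :: s.drop (j + 1) := List.drop_eq_getElem_cons hj
      by_cases he : s[j] = '='
      · rw [hstep, if_pos ⟨by exact_mod_cast hj, by rw [hget, he]⟩,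
          show ((j : Int) + 1) = ((j + 1 : Nat) : Int) by push_cast; ring,
          ih (j + 1) (level + 1) (by omega), hdrop]
        simp [scanSpec, he]
      · rw [hstep, if_neg (by rintro ⟨-, hc⟩; rw [hget] at hc; exact he (by injection hc))]
        unfold pvAFinal
        rw [hdrop]
        by_cases hb : s[j] = '['
        · rw [if_pos ⟨by exact_mod_cast hj, by rw [hget, hb]⟩]
          simp [scanSpec, he, hb]
        · rw [if_neg (by rintro ⟨-, hc⟩; rw [hget] at hc; exact hb (by injection hc))]
          simp [scanSpec, he, hb]
    · have hd : s.drop j = [] := List.drop_eq_nil_of_le (by omega)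
      rw [hstep, if_neg (by rintro ⟨h1, -⟩; omega)]
      unfold pvAFinal
      rw [if_neg (by rintro ⟨h1, -⟩; omega), hd]
      rfl

theorem pvALoop_neg (s : List Char) :
    ∀ (k : Nat) (level : Int) (fuel : Nat), k ≤ s.length → s.length + k ≤ fuel →
      pvALoop s (-(k : Int)) level fuel = scanNegSpec (s.drop (s.length - k)) s level := by
  intro k
  induction k with
  | zero =>
    intro level fuel _ hf
    simp only [Nat.cast_zero, neg_zero, Nat.sub_zero, List.drop_length, scanNegSpec]
    have := pvALoop_nonneg s fuel 0 level (by omega)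
    simpa using this
  | succ k ih =>
    intro level fuel hk hf
    obtain ⟨f, rfl⟩ : ∃ f, fuel = f + 1 := ⟨fuel - 1, by omega⟩
    have hp : s.length - (k + 1) < s.length := by omega
    have hget : PySem.List.pyGet? s (-((k + 1 : Nat) : Int)) = some s[s.length - (k + 1)] := by
      rw [PySem.List.pyGet?_neg_natCast (xs := s) (k := k + 1) (by omega) hk]
      exact List.getElem?_eq_getElem hp
    have hdrop : s.drop (s.length - (k + 1)) = s[s.length - (k + 1)] :: s.drop (s.length - k) := by
      have h1 : s.length - (k + 1) + 1 = s.length - k := by omega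
      rw [List.drop_eq_getElem_cons hp, h1]
    have hlt : -((k + 1 : Nat) : Int) < (s.length : Int) := by
      have h0 : (0 : Int) ≤ (s.length : Int) := by positivity
      omega
    have hstep : pvALoop s (-((k + 1 : Nat) : Int)) level (f + 1) =
        if -((k + 1 : Nat) : Int) < (s.length : Int) ∧
            PySem.List.pyGet? s (-((k + 1 : Nat) : Int)) = some '=' then
          pvALoop s (-((k + 1 : Nat) : Int) + 1) (level + 1) f
        else pvAFinal s (-((k + 1 : Nat) : Int)) level := rfl
    by_cases he : s[s.length - (k + 1)] = '='
    · rw [hstep, if_pos ⟨hlt, by rw [hget, he]⟩,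
        show (-((k + 1 : Nat) : Int) + 1) = -((k : Nat) : Int) by push_cast; ring,
        ih (level + 1) f (by omega) (by omega), hdrop]
      simp [scanNegSpec, he]
    · rw [hstep, if_neg (by rintro ⟨-, hc⟩; rw [hget] at hc; exact he (by injection hc))]
      unfold pvAFinal
      rw [hdrop]
      by_cases hb : s[s.length - (k + 1)] = '['
      · rw [if_pos ⟨hlt, by rw [hget, hb]⟩]
        simp [scanNegSpec, he, hb]
      · rw [if_neg (by rintro ⟨-, hc⟩; rw [hget] at hc; exact hb (by injection hc))]
        simp [scanNegSpec, he, hb]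

theorem scanSpec_eq_strip (t : List Char) :
    ∀ level : Int, scanSpec t level =
      if (t.dropWhile (· == '=')).head? = some '[' then
        level + ((t.length : Int) - ((t.dropWhile (· == '=')).length : Int))
      else -1 := by
  induction t with
  | nil => intro level; simp [scanSpec, List.dropWhile]
  | cons c r ih =>
    intro level
    by_cases he : c = '='
    · simp only [scanSpec, he, if_pos rfl, List.dropWhile_cons, beq_self_eq_true, if_true]
      rw [ih (level + 1)]
      have hle : (r.dropWhile (· == '=')).length ≤ r.length := List.length_dropWhile_le _ _
      split_ifs with h
      · simp only [List.length_cons]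
        push_cast
        ring
      · rfl
    · have hdw : (c :: r).dropWhile (· == '=') = c :: r := by
        simp [List.dropWhile_cons, he]
      by_cases hb : c = '['
      · simp [scanSpec, he, hb, hdw]
      · simp [scanSpec, he, hb, hdw]

theorem scanNegSpec_eq (s : List Char) :
    ∀ (t : List Char) (level : Int), scanNegSpec t s level =
      if t.all (· == '=') then scanSpec s (level + t.length) else scanSpec t level := by
  intro t
  induction t with
  | nil => intro level; simp [scanNegSpec, scanSpec]
  | cons c r ih =>
    intro level
    by_cases he : c = '='
    · simp only [scanNegSpec, he, if_pos rfl, List.all_cons, beq_self_eq_true, Bool.true_and]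
      rw [ih (level + 1)]
      by_cases hall : r.all (· == '=')
      · simp only [hall, if_true, List.length_cons, scanSpec, if_pos rfl]
        push_cast
        ring_nf
      · simp [hall, scanSpec]
    · have : (c == '=') = false := by simp [he]
      by_cases hb : c = '['
      · simp [scanNegSpec, scanSpec, he, hb, this]
      · simp [scanNegSpec, scanSpec, he, hb, this]

-- if no prefix of '='s in s is followed by '[', the plain scan fails
theorem scanSpec_eq_neg_one (s : List Char)
    (h : ¬ ∃ j, j < s.length ∧ (∀ i, i < j → s[i]? = some '=') ∧ s[j]? = some '[') :
    ∀ level : Int, scanSpec s level = -1 := by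
  induction s with
  | nil => intro level; rfl
  | cons c r ih =>
    intro level
    by_cases he : c = '='
    · have h' : ¬ ∃ j, j < r.length ∧ (∀ i, i < j → r[i]? = some '=') ∧ r[j]? = some '[' := by
        rintro ⟨j, hj, hpre, hj2⟩
        exact h ⟨j + 1, by simpa using hj, by
          intro i hi
          cases i with
          | zero => simp [he]
          | succ i => simpa using hpre i (by omega), by simpa using hj2⟩
      simp [scanSpec, he, ih h']
    · by_cases hb : c = '['
      · exact absurd ⟨0, by simp, by omega, by simp [hb]⟩ h
      · simp [scanSpec, he, hb]

-- if some prefix of '='s in s is followed by '[', the plain scan succeeds (returns ≥ level)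
theorem scanSpec_ge (s : List Char)
    (h : ∃ j, j < s.length ∧ (∀ i, i < j → s[i]? = some '=') ∧ s[j]? = some '[') :
    ∀ level : Int, level ≤ scanSpec s level := by
  induction s with
  | nil => obtain ⟨j, hj, -, -⟩ := h; simp at hj
  | cons c r ih =>
    intro level
    obtain ⟨j, hj, hpre, hj2⟩ := h
    by_cases he : c = '='
    · cases j with
      | zero => simp [he] at hj2
      | succ j =>
        have h' : ∃ j', j' < r.length ∧ (∀ i, i < j' → r[i]? = some '=') ∧ r[j']? = some '[' :=
          ⟨j, by simpa using hj, fun i hi => by simpa using hpre (i + 1) (by omega), by simpa using hj2⟩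
        have hih := ih h' (level + 1)
        have heq : scanSpec (c :: r) level = scanSpec r (level + 1) := by simp [scanSpec, he]
        rw [heq]
        omega
    · have hc : c = '[' := by
        cases j with
        | zero => simpa using hj2
        | succ j => exact absurd (by simpa using hpre 0 (by omega)) he
      simp [scanSpec, he, hc]

-- B in terms of scanSpec on the clamped suffix
theorem alt_eq_scan (src : String) (pos : Int) :
    long_bracket_level_py_alt src pos =
      if (PySem.List.slice src.toList (some pos) none).head? = some '[' then
        scanSpec (PySem.List.slice src.toList (some pos) none).tail 0
      else -1 := by
  unfold long_bracket_level_py_alt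
  cases hrest : PySem.List.slice src.toList (some pos) none with
  | nil => simp [PySem.Chars.startswith]
  | cons c inner =>
    by_cases hc : c = '['
    · subst hc
      have h1 : PySem.Chars.startswith ('[' :: inner) ['['] = true := by
        rw [PySem.Chars.startswith_iff]; exact ⟨inner, rfl⟩
      have h2 : PySem.List.slice ('[' :: inner) (some 1) none = inner := by
        rw [PySem.List.slice_from_one]; rfl
      simp only [h1, if_true, h2, List.head?_cons, List.tail_cons]
      rw [scanSpec_eq_strip inner 0]
      have hle : (inner.dropWhile (· == '=')).length ≤ inner.length := List.length_dropWhile_le _ _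
      cases hdw : (inner.dropWhile (· == '=')).head? with
      | none =>
        have hb : PySem.Chars.startswith (inner.dropWhile (· == '=')) ['['] = false := by
          rw [List.head?_eq_none_iff] at hdw
          simp [hdw, PySem.Chars.startswith]
        simp [hb, hdw]
      | some d =>
        by_cases hd : d = '['
        · subst hd
          obtain ⟨tl, htl⟩ : ∃ tl, inner.dropWhile (· == '=') = '[' :: tl := by
            cases h : inner.dropWhile (· == '=') with
            | nil => simp [h] at hdw
            | cons a b => rw [h] at hdw; simp at hdw; exact ⟨b, by rw [hdw]⟩
          have hb : PySem.Chars.startswith (inner.dropWhile (· == '=')) ['['] = true := by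
            rw [PySem.Chars.startswith_iff, htl]; exact ⟨tl, rfl⟩
          simp [hb, hdw]
        · have hb : PySem.Chars.startswith (inner.dropWhile (· == '=')) ['['] = false := by
            rcases h : inner.dropWhile (· == '=') with _ | ⟨a, b⟩
            · simp [h] at hdw
            · rw [h] at hdw
              simp at hdw
              subst hdw
              rw [Bool.eq_false_iff]
              intro hcon
              rw [PySem.Chars.startswith_iff] at hcon
              obtain ⟨u, hu⟩ := hcon
              simp at hu
              exact hd hu.1.symm
          simp [hb, hdw, hd]
    · have h1 : PySem.Chars.startswith (c :: inner) ['['] = false := by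
        rw [Bool.eq_false_iff]
        intro hcon
        rw [PySem.Chars.startswith_iff] at hcon
        obtain ⟨u, hu⟩ := hcon
        simp at hu
        exact hc hu.1.symm
      simp [h1, hc]

theorem scanSpec_of_all (t : List Char) (h : t.all (· == '=') = true) (level : Int) :
    scanSpec t level = -1 := by
  rw [scanSpec_eq_strip]
  have hdw : t.dropWhile (· == '=') = [] :=
    List.dropWhile_eq_nil_iff.mpr (by simpa [List.all_eq_true] using h)
  simp [hdw]

theorem all_drop_iff (s : List Char) (p : Nat) :
    ((s.drop (p + 1)).all (· == '=') = true) ↔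
      ∀ i, i < s.length → p < i → s[i]? = some '=' := by
  rw [List.all_eq_true]
  constructor
  · intro h i hi hpi
    have hj : i - (p + 1) < (s.drop (p + 1)).length := by
      rw [List.length_drop]; omega
    have hmem := h _ (List.getElem_mem hj)
    have heq : (s.drop (p + 1))[i - (p + 1)] = s[i] := by
      rw [List.getElem_drop]
      congr 1
      omega
    rw [heq, beq_iff_eq] at hmem
    rw [List.getElem?_eq_getElem hi, hmem]
  · intro h x hx
    obtain ⟨j, hj, rfl⟩ := List.mem_iff_getElem.mp hx
    have hi : p + 1 + j < s.length := by
      rw [List.length_drop] at hj; omega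
    have := h (p + 1 + j) hi (by omega)
    rw [List.getElem?_eq_getElem hi] at this
    rw [List.getElem_drop]
    simpa using this

-- port A at an in-range nonnegative pos that holds '[': the remaining scan
theorem a_nonneg_eq (src : String) (p : Nat) (hp : p < src.toList.length)
    (hc : src.toList[p] = '[') :
    long_bracket_level_py src (p : Int) = scanSpec (src.toList.drop (p + 1)) 0 := by
  unfold long_bracket_level_py
  have hget : PySem.List.pyGet? src.toList (p : Int) = some '[' := by
    simp [PySem.List.pyGet?_natCast, List.getElem?_eq_getElem hp, hc]
  rw [if_neg (by push_neg; exact ⟨by exact_mod_cast hp, hget⟩)]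
  rw [show ((p : Int) + 1) = ((p + 1 : Nat) : Int) by push_cast; ring]
  exact pvALoop_nonneg src.toList _ (p + 1) 0 (by omega)

-- port A at an in-range negative pos -k that holds '[': the wrapping scan
theorem a_neg_eq (src : String) (k : Nat) (hk1 : 0 < k) (hk2 : k ≤ src.toList.length)
    (hc : src.toList[src.toList.length - k]? = some '[') :
    long_bracket_level_py src (-(k : Int)) =
      scanNegSpec (src.toList.drop (src.toList.length - (k - 1))) src.toList 0 := by
  unfold long_bracket_level_py
  have hget : PySem.List.pyGet? src.toList (-(k : Int)) = some '[' := by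
    rw [PySem.List.pyGet?_neg_natCast (xs := src.toList) (k := k) hk1 hk2]
    exact hc
  rw [if_neg (by push_neg; exact ⟨by omega, hget⟩)]
  rw [show (-(k : Int) + 1) = -((k - 1 : Nat) : Int) by omega]
  exact pvALoop_neg src.toList (k - 1) 0 _ (by omega) (by omega)

theorem long_bracket_level_py_spec : Claim_unchanged_long_bracket_level_py := by
  intro src pos _ hpre hnd
  unfold Pre_long_bracket_level_py at hpre
  unfold D_long_bracket_level_py at hnd
  rw [alt_eq_scan]
  by_cases h1 : (src.toList.length : Int) ≤ pos
  · have hA : long_bracket_level_py src pos = -1 := by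
      unfold long_bracket_level_py
      rw [if_pos (Or.inl h1)]
    have hslice : PySem.List.slice src.toList (some pos) none = [] := by
      rw [PySem.List.slice_from (xs := src.toList) (a := pos) (by omega)]
      exact List.drop_eq_nil_of_le (by omega)
    rw [hA, hslice]
    simp
  · push_neg at h1
    by_cases h0 : 0 ≤ pos
    · obtain ⟨p, rfl⟩ : ∃ p : Nat, pos = (p : Int) := ⟨pos.toNat, (Int.toNat_of_nonneg h0).symm⟩
      have hp : p < src.toList.length := by exact_mod_cast h1
      have hslice : PySem.List.slice src.toList (some (p : Int)) none = src.toList.drop p :=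
        PySem.List.slice_from_natCast src.toList p
      have hdropc : src.toList.drop p = src.toList[p] :: src.toList.drop (p + 1) :=
        List.drop_eq_getElem_cons hp
      by_cases hc : src.toList[p] = '['
      · rw [a_nonneg_eq src p hp hc, hslice, hdropc, hc]
        simp
      · have hA : long_bracket_level_py src (p : Int) = -1 := by
          unfold long_bracket_level_py
          rw [if_pos (Or.inr (by
            rw [PySem.List.pyGet?_natCast, List.getElem?_eq_getElem hp]
            simpa using hc))]
        rw [hA, hslice, hdropc]
        rw [if_neg (by simp only [List.head?_cons, Option.some.injEq]; exact hc)]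
    · push_neg at h0
      obtain ⟨k, hk1, hk2, rfl⟩ : ∃ k : Nat, 0 < k ∧ k ≤ src.toList.length ∧ pos = -(k : Int) :=
        ⟨(-pos).toNat, by omega, by omega, by omega⟩
      have hp : src.toList.length - k < src.toList.length := by omega
      have hslice : PySem.List.slice src.toList (some (-(k : Int))) none
          = src.toList.drop (src.toList.length - k) :=
        PySem.List.slice_from_neg_natCast (xs := src.toList) (k := k) hk1
      have hdropc : src.toList.drop (src.toList.length - k)
          = src.toList[src.toList.length - k] :: src.toList.drop (src.toList.length - k + 1) :=
        List.drop_eq_getElem_cons hp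
      by_cases hc : src.toList[src.toList.length - k] = '['
      · rw [a_neg_eq src k hk1 hk2 (by rw [List.getElem?_eq_getElem hp, hc]),
          show src.toList.length - (k - 1) = src.toList.length - k + 1 by omega,
          scanNegSpec_eq, hslice, hdropc, hc]
        simp only [List.head?_cons, List.tail_cons, if_pos rfl]
        by_cases hall : (src.toList.drop (src.toList.length - k + 1)).all (· == '=') = true
        · have hC4 := (all_drop_iff src.toList (src.toList.length - k)).mp hall
          have hidx : (-(k : Int) + src.toList.length).toNat = src.toList.length - k := by omega
          have hC5 : ¬ ∃ j, j < src.toList.length ∧ (∀ i, i < j → src.toList[i]? = some '=') ∧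
              src.toList[j]? = some '[' := by
            intro h5
            exact hnd ⟨by omega, by omega, by rw [hidx, List.getElem?_eq_getElem hp, hc],
              by rw [hidx]; exact fun i hi hpi => hC4 i hi hpi, h5⟩
          rw [if_pos hall, scanSpec_eq_neg_one src.toList hC5, scanSpec_of_all _ hall]
          simp
        · rw [if_neg hall]
          simp
      · have hA : long_bracket_level_py src (-(k : Int)) = -1 := by
          unfold long_bracket_level_py
          rw [if_pos (Or.inr (by
            rw [PySem.List.pyGet?_neg_natCast (xs := src.toList) (k := k) hk1 hk2,
              List.getElem?_eq_getElem hp]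
            simpa using hc))]
        rw [hA, hslice, hdropc]
        rw [if_neg (by simp only [List.head?_cons, Option.some.injEq]; exact hc)]

theorem long_bracket_level_py_tight : Claim_exact_long_bracket_level_py := by
  intro src pos _ hpre hD
  unfold D_long_bracket_level_py at hD
  obtain ⟨hneg, hge, hC3, hC4, hC5⟩ := hD
  obtain ⟨k, hk1, hk2, rfl⟩ : ∃ k : Nat, 0 < k ∧ k ≤ src.toList.length ∧ pos = -(k : Int) :=
    ⟨(-pos).toNat, by omega, by omega, by omega⟩
  have hidx : (-(k : Int) + src.toList.length).toNat = src.toList.length - k := by omega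
  rw [hidx] at hC3 hC4
  have hp : src.toList.length - k < src.toList.length := by omega
  have hc : src.toList[src.toList.length - k] = '[' := by
    rw [List.getElem?_eq_getElem hp] at hC3
    exact Option.some.inj hC3
  have hall : (src.toList.drop (src.toList.length - k + 1)).all (· == '=') = true :=
    (all_drop_iff src.toList (src.toList.length - k)).mpr hC4
  -- A wraps and finds the bracket: its value is ≥ 0
  have hA : 0 ≤ long_bracket_level_py src (-(k : Int)) := by
    rw [a_neg_eq src k hk1 hk2 hC3,
      show src.toList.length - (k - 1) = src.toList.length - k + 1 by omega,
      scanNegSpec_eq, if_pos hall]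
    have := scanSpec_ge src.toList hC5 (0 + ((src.toList.drop (src.toList.length - k + 1)).length : Int))
    omega
  -- B sees only '=' after the '[' in the suffix: -1
  have hB : long_bracket_level_py_alt src (-(k : Int)) = -1 := by
    rw [alt_eq_scan, PySem.List.slice_from_neg_natCast (xs := src.toList) (k := k) hk1,
      List.drop_eq_getElem_cons hp, hc]
    simp only [List.head?_cons, List.tail_cons, if_pos rfl]
    exact scanSpec_of_all _ hall 0
  rw [hB]
  omega

theorem long_bracket_level_py_changed : Claim_changed_long_bracket_level_py := by
  unfold Claim_changed_long_bracket_level_py; decide
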